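-- pv_equiv track=rewrite | github.com/Hansung-include/Coding-Test-Study | 02주차/2309/이준형_2309.py | find_dwarf
-- ===== SOURCE A (Python) =====
-- def find_dwarf(dwarf_list):
--     for i in range(len(dwarf_list)):
--         for j in range(i+1, len(dwarf_list)):
--             total_height = sum(dwarf_list) - dwarf_list[i] - dwarf_list[j]
--
--             if total_height == 100:
--                 # 가짜 두명의 난쟁이들을 리스트에서 없앤다.
--                 n1, n2 = dwarf_list[i], dwarf_list[j]
--                 dwarf_list.remove(n1)
--                 dwarf_list.remove(n2)
--                 dwarf_list.sort()
--                 return dwarf_list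
-- ===== SOURCE B (Python) =====
-- def find_dwarf(dwarf_list):
--     # One pass with a value -> last-index map instead of A's O(n^3) triple scan.
--     # Mutates dwarf_list the same way A does when a pair is found.
--     target = sum(dwarf_list) - 100
--     last = {}
--     for idx, v in enumerate(dwarf_list):
--         last[v] = idx
--     for i, v in enumerate(dwarf_list):
--         if last.get(target - v, -1) > i:
--             dwarf_list.remove(v)
--             dwarf_list.remove(target - v)
--             dwarf_list.sort()
--             return dwarf_list
--     return None
-- ===== Notes on version B (the rewrite author's own statement) =====
-- stated objective: faster
-- what changed: Replaces A's triple-nested work (pair loop with sum() recomputed per pair) by computing the total once, building a value->last-index dict in one pass, and a single scan that tests in O(1) whether the complement target-v occurs later in the list.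
import Mathlib
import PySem

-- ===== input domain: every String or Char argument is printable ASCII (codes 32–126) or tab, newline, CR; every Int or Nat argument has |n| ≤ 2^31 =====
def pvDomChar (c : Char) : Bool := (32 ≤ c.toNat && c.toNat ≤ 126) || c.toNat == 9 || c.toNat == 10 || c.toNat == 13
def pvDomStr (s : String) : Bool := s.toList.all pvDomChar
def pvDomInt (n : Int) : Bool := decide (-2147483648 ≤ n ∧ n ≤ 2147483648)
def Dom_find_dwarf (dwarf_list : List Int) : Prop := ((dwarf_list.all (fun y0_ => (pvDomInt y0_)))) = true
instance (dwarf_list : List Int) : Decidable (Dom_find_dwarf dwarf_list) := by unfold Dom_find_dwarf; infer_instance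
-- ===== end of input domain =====

-- B replaces A's triple-nested work (pair loop recomputing sum) by a one-pass value->last-index
-- dict and a single scan (faster); equivalence is about the return value — both Pythons also
-- mutate dwarf_list identically on success.


-- ===== PORT A =====
-- inner 'for j in range(i+1, len(dwarf_list)):' loop; early return = some
def findA_inner (lst : List Int) (i : Int) : List Int → Option (List Int)
  | [] => none
  | j :: js =>
    let total_height := lst.sum - PySem.List.pyGetD lst i 0 - PySem.List.pyGetD lst j 0
    if total_height = 100 then
      let n1 := PySem.List.pyGetD lst i 0
      let n2 := PySem.List.pyGetD lst j 0
      -- list.remove(x) is erase of the first occurrence; exact here since n1, n2 ∈ lst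
      -- (they are lst[i], lst[j] with i, j in range); list.sort() is sorted with identity key
      some (PySem.List.sorted ((lst.erase n1).erase n2) (fun x => x) false)
    else
      findA_inner lst i js

-- outer 'for i in range(len(dwarf_list)):' loop
def findA_outer (lst : List Int) : List Int → Option (List Int)
  | [] => none
  | i :: is_ =>
    match findA_inner lst i (PySem.List.pyRange (i + 1) lst.length 1) with
    | some r => some r
    | none => findA_outer lst is_

def find_dwarf (dwarf_list : List Int) : Option (List Int) :=
  findA_outer dwarf_list (PySem.List.pyRange 0 dwarf_list.length 1)

-- ===== PORT B =====
-- 'for i, v in enumerate(dwarf_list):' scan with the prebuilt last-occurrence dict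
def findB_scan (lst : List Int) (target : Int) (last : PySem.Dict Int Int) :
    List (Int × Int) → Option (List Int)
  | [] => none
  | (i, v) :: rest =>
    if last.getD (target - v) (-1) > i then
      -- remove(v); remove(target - v): exact, both values occur in lst (v = lst[i], and the
      -- dict lookup certifies target - v occurs at an index > i); sort() = sorted, id key
      some (PySem.List.sorted ((lst.erase v).erase (target - v)) (fun x => x) false)
    else
      findB_scan lst target last rest

def find_dwarf_alt (dwarf_list : List Int) : Option (List Int) :=
  let target := dwarf_list.sum - 100
  let last := (PySem.List.enumerate dwarf_list 0).foldl
    (fun d (p : Int × Int) => d.insert p.2 p.1) PySem.Dict.empty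
  findB_scan dwarf_list target last (PySem.List.enumerate dwarf_list 0)

-- ===== PRECONDITION & SPEC =====
def Spec_find_dwarf (dwarf_list : List Int) (out : Option (List Int)) : Prop := out = find_dwarf_alt dwarf_list
instance (dwarf_list : List Int) (out : Option (List Int)) : Decidable (Spec_find_dwarf dwarf_list out) := by unfold Spec_find_dwarf; infer_instance

-- ===== CLAIM (what is proved, stated in full; the proofs are below) =====
def Claim_equal_find_dwarf : Prop := ∀ (dwarf_list : List Int), Dom_find_dwarf dwarf_list → Spec_find_dwarf dwarf_list (find_dwarf dwarf_list)

-- ===== LEMMAS AND PROOFS =====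

-- the dict built by B: last occurrence index of each value
def buildLast (lst : List Int) : PySem.Dict Int Int :=
  (PySem.List.enumerate lst 0).foldl (fun d (p : Int × Int) => d.insert p.2 p.1) PySem.Dict.empty

lemma buildLast_append (xs : List Int) (y : Int) :
    buildLast (xs ++ [y]) = (buildLast xs).insert y (xs.length : Int) := by
  simp [buildLast, PySem.List.enumerate_append, List.foldl_append, PySem.List.enumerate]

-- the dict lookup tests "x occurs at some index > i"
lemma buildLast_getD_gt (lst : List Int) (x : Int) (i : Nat) :
    ((buildLast lst).getD x (-1) > (i : Int)) ↔ x ∈ lst.drop (i + 1) := by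
  induction lst using List.reverseRecOn with
  | nil => simp [buildLast, PySem.Dict.getD_empty]
  | append_singleton xs y ih =>
    rw [buildLast_append, PySem.Dict.getD_insert]
    rw [List.drop_append]
    by_cases hxy : x = y
    · subst hxy
      rw [if_pos rfl]
      simp only [List.mem_append]
      by_cases hlen : i + 1 ≤ xs.length
      · have h0 : i + 1 - xs.length = 0 := Nat.sub_eq_zero_of_le hlen
        rw [h0]
        constructor
        · intro _; right; simp
        · intro _; omega
      · have h0 : [x].drop (i + 1 - xs.length) = [] := by
          apply List.drop_eq_nil_of_le; simp; omega
        rw [h0]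
        have h1 : xs.drop (i + 1) = [] := List.drop_eq_nil_of_le (by omega)
        rw [h1]
        simp only [List.not_mem_nil, or_self, iff_false]
        intro hc
        have : (i : Int) < (xs.length : Int) := lt_of_lt_of_le hc (by simp)
        omega
    · rw [if_neg hxy, ih]
      simp only [List.mem_append]
      constructor
      · intro h; left; exact h
      · intro h
        rcases h with h | h
        · exact h
        · exfalso
          have := List.mem_of_mem_drop h
          simp at this
          exact hxy this

-- A's inner loop, characterised: first j ≥ a with lst[j] = w, w := sum - 100 - lst[i]
lemma innerA_eq (lst : List Int) (i : Nat) (hi : i < lst.length) (a : Nat) :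
    findA_inner lst (i : Int) (PySem.List.pyRange (a : Int) (lst.length : Int) 1) =
      (if (lst.sum - 100 - lst[i]) ∈ lst.drop a then
        some (PySem.List.sorted ((lst.erase lst[i]).erase (lst.sum - 100 - lst[i])) (fun x => x) false)
      else none) := by
  induction h : lst.length - a generalizing a with
  | zero =>
    have ha : lst.length ≤ a := by omega
    rw [PySem.List.pyRange_one_eq_nil (by exact_mod_cast ha), List.drop_eq_nil_of_le ha]
    simp [findA_inner]
  | succ n ih =>
    have ha : a < lst.length := by omega
    rw [PySem.List.pyRange_one_cons (by exact_mod_cast ha)]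
    rw [List.drop_eq_getElem_cons ha]
    have hga : PySem.List.pyGetD lst (a : Int) 0 = lst[a] := by
      rw [PySem.List.pyGetD_eq_getElem lst (i := (a : Int)) 0 (Int.natCast_nonneg _) (by exact_mod_cast ha)]
      simp
    have hgi : PySem.List.pyGetD lst (i : Int) 0 = lst[i] := by
      rw [PySem.List.pyGetD_eq_getElem lst (i := (i : Int)) 0 (Int.natCast_nonneg _) (by exact_mod_cast hi)]
      simp
    show (if lst.sum - PySem.List.pyGetD lst (i:Int) 0 - PySem.List.pyGetD lst (a:Int) 0 = 100 then _ else _) = _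
    rw [hga, hgi]
    by_cases hc : lst[a] = lst.sum - 100 - lst[i]
    · rw [if_pos (by omega), if_pos (List.mem_cons.mpr (Or.inl hc.symm)), hc]
    · rw [if_neg (by omega)]
      have : ((a : Int) + 1) = ((a + 1 : Nat) : Int) := by push_cast; ring
      rw [this, ih (a + 1) (by omega)]
      by_cases hm : (lst.sum - 100 - lst[i]) ∈ lst.drop (a + 1)
      · rw [if_pos hm, if_pos (List.mem_cons.mpr (Or.inr hm))]
      · rw [if_neg hm, if_neg (by
          intro hcon
          rcases List.mem_cons.mp hcon with h' | h'
          · exact hc h'.symm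
          · exact hm h')]

lemma main_eq (lst : List Int) (k : Nat) :
    findA_outer lst (PySem.List.pyRange (k : Int) (lst.length : Int) 1) =
      findB_scan lst (lst.sum - 100) (buildLast lst) (PySem.List.enumerate (lst.drop k) (k : Int)) := by
  induction h : lst.length - k generalizing k with
  | zero =>
    have hk : lst.length ≤ k := by omega
    rw [PySem.List.pyRange_one_eq_nil (by exact_mod_cast hk), List.drop_eq_nil_of_le hk,
        PySem.List.enumerate_nil]
    rfl
  | succ n ih =>
    have hk : k < lst.length := by omega
    rw [PySem.List.pyRange_one_cons (by exact_mod_cast hk), List.drop_eq_getElem_cons hk,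
        PySem.List.enumerate_cons]
    simp only [findA_outer, findB_scan]
    have hcast : ((k : Int) + 1) = ((k + 1 : Nat) : Int) := by push_cast; ring
    rw [hcast, innerA_eq lst k hk (k + 1)]
    by_cases hm : (lst.sum - 100 - lst[k]) ∈ lst.drop (k + 1)
    · rw [if_pos hm, if_pos ((buildLast_getD_gt lst (lst.sum - 100 - lst[k]) k).mpr hm)]
    · rw [if_neg hm, if_neg (fun hc => hm ((buildLast_getD_gt lst (lst.sum - 100 - lst[k]) k).mp hc))]
      rw [ih (k + 1) (by omega)]

-- ===== VERDICT (by name: the statement is the Claim_ definition above) =====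
theorem find_dwarf_spec : Claim_equal_find_dwarf := by
  intro lst _
  unfold Spec_find_dwarf find_dwarf find_dwarf_alt
  have h := main_eq lst 0
  simpa [buildLast] using h
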